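-- pv_equiv track=rewrite | github.com/ZixuanWWW/CP1404_practical | prac_05/wimbledon.py | get_countries
-- ===== SOURCE A (Python) =====
-- def get_countries(data):
--     countries = {}
--     for row in data:
--         country = row[1]
--         if country in countries:
--             countries[country] += 1
--         else:
--             countries[country] = 1
--     sorted_countries = sorted(countries.keys())
--     return sorted_countries, len(countries)
-- ===== SOURCE B (Python) =====
-- def get_countries(data):
--     names = [row[1] for row in data]
--     names.sort()
--     countries = []
--     count = 0
--     previous = None
--     for name in names:
--         if name != previous:
--             countries.append(name)
--             count += 1
--             previous = name
--     return countries, count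
-- ===== Notes on version B (the rewrite author's own statement) =====
-- stated objective: alternative
-- what changed: Replaces A's count-dict built per row followed by sorting the keys with a flat list of second-column values that is sorted first and then deduplicated in one adjacency pass with a previous-value sentinel, counting as it goes.
import Mathlib
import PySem

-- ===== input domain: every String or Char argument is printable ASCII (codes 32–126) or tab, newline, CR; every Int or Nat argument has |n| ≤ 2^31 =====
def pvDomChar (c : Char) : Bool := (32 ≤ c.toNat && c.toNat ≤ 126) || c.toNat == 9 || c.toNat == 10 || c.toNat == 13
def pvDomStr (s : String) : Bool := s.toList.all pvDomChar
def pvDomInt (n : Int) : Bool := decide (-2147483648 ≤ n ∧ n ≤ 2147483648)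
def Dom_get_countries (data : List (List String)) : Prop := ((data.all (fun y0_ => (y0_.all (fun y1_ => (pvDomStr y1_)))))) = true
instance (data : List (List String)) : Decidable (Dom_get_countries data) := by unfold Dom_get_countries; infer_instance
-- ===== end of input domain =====

-- B replaces A's per-row count-dict + key sort by sort-the-names-first then one adjacency
-- dedup pass with a previous-value sentinel (alternative decomposition, same asymptotic cost).


-- ===== PORT A =====
def get_countries (data : List (List String)) : List String × Int :=
  let countries : PySem.Dict String Int :=
    data.foldl (fun countries row =>
      let country := PySem.List.pyGetD row 1 ""
      if countries.contains country then
        countries.insert country (countries.getD country 0 + 1)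
      else
        countries.insert country 1) PySem.Dict.empty
  let sorted_countries := PySem.List.sorted countries.keys (fun x => x) false
  (sorted_countries, (countries.size : Int))

-- ===== PORT B =====
def get_countries_alt (data : List (List String)) : List String × Int :=
  let names := data.map (fun row => PySem.List.pyGetD row 1 "")
  let names := PySem.List.sorted names (fun x => x) false
  let r := names.foldl (fun st name =>
      if some name ≠ st.2.2 then (st.1 ++ [name], st.2.1 + 1, some name) else st)
    (([] : List String), (0 : Int), (none : Option String))
  (r.1, r.2.1)

-- ===== PRECONDITION & SPEC =====
-- Pre_ excludes exactly the inputs where Python raises IndexError: a row with fewer than 2 entries (row[1]).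
def Pre_get_countries (data : List (List String)) : Prop := ∀ row ∈ data, 2 ≤ row.length
instance (data : List (List String)) : Decidable (Pre_get_countries data) := by unfold Pre_get_countries; infer_instance
def pvWitness_get_countries : List (List String) := [["ash", "UK"], ["bo", "AUS"], ["cy", "UK"]]

def Spec_get_countries (data : List (List String)) (out : List String × Int) : Prop := out = get_countries_alt data
instance (data : List (List String)) (out : List String × Int) : Decidable (Spec_get_countries data out) := by unfold Spec_get_countries; infer_instance

-- ===== CLAIM (what is proved, stated in full; the proofs are below) =====
def Claim_equal_get_countries : Prop := ∀ (data : List (List String)), Dom_get_countries data → Pre_get_countries data → Spec_get_countries data (get_countries data)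

-- ===== LEMMAS AND PROOFS =====

-- B's adjacency-dedup loop over a ≤-sorted list: the accumulated invariants.
theorem foldB_invariant (l acc : List String) (k : Int) (prev : Option String)
    (hk : k = (acc.length : Int))
    (hnil : prev = none → acc = [])
    (hmem : ∀ p, prev = some p → p ∈ acc)
    (hub : ∀ p, prev = some p → ∀ x ∈ acc, x ≤ p)
    (hpw : acc.Pairwise (· < ·))
    (hlb : ∀ p, prev = some p → ∀ y ∈ l, p ≤ y)
    (hsort : l.Pairwise (· ≤ ·)) :
    (l.foldl (fun st name =>
        if some name ≠ st.2.2 then (st.1 ++ [name], st.2.1 + 1, some name) else st)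
      (acc, k, prev)).1.Pairwise (· < ·) ∧
    (∀ x, x ∈ (l.foldl (fun st name =>
        if some name ≠ st.2.2 then (st.1 ++ [name], st.2.1 + 1, some name) else st)
      (acc, k, prev)).1 ↔ x ∈ acc ∨ x ∈ l) ∧
    (l.foldl (fun st name =>
        if some name ≠ st.2.2 then (st.1 ++ [name], st.2.1 + 1, some name) else st)
      (acc, k, prev)).2.1 =
      ((l.foldl (fun st name =>
        if some name ≠ st.2.2 then (st.1 ++ [name], st.2.1 + 1, some name) else st)
      (acc, k, prev)).1.length : Int) := by
  induction l generalizing acc k prev with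
  | nil => exact ⟨hpw, fun x => by simp, by simpa using hk⟩
  | cons name rest ih =>
    rw [List.pairwise_cons] at hsort
    by_cases h : some name = prev
    · -- duplicate of the previous value: state unchanged
      simp only [List.foldl_cons, h, ne_eq, not_true_eq_false, if_neg, not_false_eq_true]
      have hin : name ∈ acc := hmem name h.symm
      obtain ⟨hA, hB, hC⟩ := ih acc k prev hk hnil hmem hub hpw
        (fun p hp y hy => hlb p hp y (List.mem_cons_of_mem _ hy)) hsort.2
      refine ⟨hA, fun x => ?_, hC⟩
      rw [hB]
      constructor
      · rintro (hx | hx) <;> simp [hx]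
      · rintro (hx | hx)
        · exact Or.inl hx
        · rcases List.mem_cons.mp hx with hx | hx
          · exact Or.inl (hx ▸ hin)
          · exact Or.inr hx
    · -- new value: append it, bump the counter, remember it
      simp only [List.foldl_cons, if_pos h]
      have hlt : ∀ x ∈ acc, x < name := by
        intro x hx
        cases hp : prev with
        | none => simp [hnil hp] at hx
        | some p =>
          have hxp := hub p hp x hx
          have hpn : p ≤ name := hlb p hp name (List.mem_cons_self ..)
          have : p ≠ name := fun he => h (by rw [hp, he])
          exact lt_of_le_of_lt hxp (lt_of_le_of_ne hpn this)
      obtain ⟨hA, hB, hC⟩ := ih (acc ++ [name]) (k + 1) (some name)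
        (by simp [hk])
        (by simp)
        (by intro p hp; simp at hp; simp [hp])
        (by intro p hp x hx; simp at hp; subst hp
            rcases List.mem_append.mp hx with hx | hx
            · exact le_of_lt (hlt x hx)
            · simp at hx; simp [hx])
        (by rw [List.pairwise_append]; exact ⟨hpw, by simp, by simpa using hlt⟩)
        (by intro p hp y hy; simp at hp; subst hp; exact hsort.1 y hy)
        hsort.2
      refine ⟨hA, fun x => ?_, hC⟩
      rw [hB]
      simp only [List.mem_append, List.mem_cons]
      tauto

-- ===== VERDICT (by name: the statement is the Claim_ definition above) =====
theorem get_countries_spec : Claim_equal_get_countries := by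
  intro data _ _
  unfold Spec_get_countries get_countries get_countries_alt
  -- dict-building fold is an insert-at-key fold (pull the if into the value)
  have hf : (fun (countries : PySem.Dict String Int) (row : List String) =>
      let country := PySem.List.pyGetD row 1 ""
      if countries.contains country then
        countries.insert country (countries.getD country 0 + 1)
      else
        countries.insert country 1)
      = fun (d : PySem.Dict String Int) (row : List String) =>
        d.insert (PySem.List.pyGetD row 1 "")
          (if d.contains (PySem.List.pyGetD row 1 "") then
             d.getD (PySem.List.pyGetD row 1 "") 0 + 1 else 1) := by
    funext d row
    by_cases h : d.contains (PySem.List.pyGetD row 1 "") <;> simp [h]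
  rw [hf]
  set names := data.map (fun row => PySem.List.pyGetD row 1 "") with hnames
  have hkeys : (data.foldl (fun (d : PySem.Dict String Int) row =>
      d.insert (PySem.List.pyGetD row 1 "")
        (if d.contains (PySem.List.pyGetD row 1 "") then
           d.getD (PySem.List.pyGetD row 1 "") 0 + 1 else 1)) PySem.Dict.empty).keys
      = PySem.Set.ofList names := by
    rw [PySem.Dict.keys_foldl_insert_key data (fun row => PySem.List.pyGetD row 1 "")]
    rfl
  have hsize : (data.foldl (fun (d : PySem.Dict String Int) row =>
      d.insert (PySem.List.pyGetD row 1 "")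
        (if d.contains (PySem.List.pyGetD row 1 "") then
           d.getD (PySem.List.pyGetD row 1 "") 0 + 1 else 1)) PySem.Dict.empty).size
      = (PySem.Set.ofList names).length := by
    rw [PySem.Dict.size, ← hkeys, PySem.Dict.keys, List.length_map]
  simp only [hkeys, hsize]
  -- B's fold over the sorted names
  obtain ⟨hpw, hmemB, hcnt⟩ := foldB_invariant
    (PySem.List.sorted names (fun x => x) false) [] 0 none
    (by simp) (fun _ => rfl) (by simp) (by simp) (by simp)
    (by simp) (by simpa using PySem.List.sorted_pairwise names (fun x => x))
  set r := (PySem.List.sorted names (fun x => x) false).foldl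
      (fun st name =>
        if some name ≠ st.2.2 then (st.1 ++ [name], st.2.1 + 1, some name) else st)
      (([] : List String), (0 : Int), (none : Option String)) with hr
  -- B's list is a strictly increasing rearrangement of the distinct names
  have hperm : r.1.Perm (PySem.Set.ofList names) := by
    rw [List.perm_ext_iff_of_nodup (hpw.imp ne_of_lt) (PySem.Set.nodup_ofList names)]
    intro x
    rw [hmemB x, PySem.Set.mem_ofList]
    simp [PySem.List.mem_sorted]
  have hlist : PySem.List.sorted (PySem.Set.ofList names) (fun x => x) false = r.1 :=
    PySem.List.sorted_eq_of_perm_of_pairwise_lt _ _ _ hperm hpw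
  refine Prod.ext hlist ?_
  show ((PySem.Set.ofList names).length : Int) = r.2.1
  rw [hcnt, ← hlist, PySem.List.length_sorted]
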